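-- pv_equiv track=rewrite | github.com/doudouhi78/AITradingSystem | scripts/refresh_factor_registry.py | merge_registry_entries
-- ===== SOURCE A (Python) =====
-- from typing import Any
--
-- def merge_registry_entries(existing: list[dict[str, Any]], incoming: list[dict[str, Any]]) -> tuple[list[dict[str, Any]], int]:
--     by_name: dict[str, dict[str, Any]] = {str(item.get('factor_name')): item for item in existing if item.get('factor_name')}
--     added = 0
--     for item in incoming:
--         factor_name = str(item['factor_name'])
--         if factor_name not in by_name:
--             added += 1
--         by_name[factor_name] = item
--     merged = sorted(by_name.values(), key=lambda item: str(item.get('factor_name', '')))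
--     return merged, added
-- ===== SOURCE B (Python) =====
-- def merge_registry_entries(existing, incoming):
--     # Stage the candidates as (key, item) pairs, newest last.
--     ex_pairs = [(str(item.get('factor_name')), item) for item in existing if item.get('factor_name')]
--     inc_pairs = [(str(item['factor_name']), item) for item in incoming]
--     ex_keys = {k for k, _ in ex_pairs}
--     # Back-to-front scan: the last occurrence of each key wins, so walking the
--     # staged pairs in reverse and keeping each key the first time it appears
--     # selects exactly the winning item per key; count an addition when a kept
--     # key comes from incoming and is not an existing key.
--     seen = set()
--     kept = []
--     added = 0
--     for key, item in reversed(inc_pairs):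
--         if key not in seen:
--             seen.add(key)
--             kept.append((key, item))
--             if key not in ex_keys:
--                 added += 1
--     for key, item in reversed(ex_pairs):
--         if key not in seen:
--             seen.add(key)
--             kept.append((key, item))
--     kept.sort(key=lambda kv: kv[0])
--     return [item for _, item in kept], added
-- ===== Notes on version B (the rewrite author's own statement) =====
-- stated objective: alternative
-- what changed: Replaces A's forward dict-overwrite merge (hash map with last-wins insertion plus an in-loop membership counter) by staging all (key,item) candidate pairs and doing a back-to-front scan with a seen-set that keeps the last occurrence of each key (counting additions during that scan), then sorting the kept pairs; no merge dict is built at all.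
import Mathlib
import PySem

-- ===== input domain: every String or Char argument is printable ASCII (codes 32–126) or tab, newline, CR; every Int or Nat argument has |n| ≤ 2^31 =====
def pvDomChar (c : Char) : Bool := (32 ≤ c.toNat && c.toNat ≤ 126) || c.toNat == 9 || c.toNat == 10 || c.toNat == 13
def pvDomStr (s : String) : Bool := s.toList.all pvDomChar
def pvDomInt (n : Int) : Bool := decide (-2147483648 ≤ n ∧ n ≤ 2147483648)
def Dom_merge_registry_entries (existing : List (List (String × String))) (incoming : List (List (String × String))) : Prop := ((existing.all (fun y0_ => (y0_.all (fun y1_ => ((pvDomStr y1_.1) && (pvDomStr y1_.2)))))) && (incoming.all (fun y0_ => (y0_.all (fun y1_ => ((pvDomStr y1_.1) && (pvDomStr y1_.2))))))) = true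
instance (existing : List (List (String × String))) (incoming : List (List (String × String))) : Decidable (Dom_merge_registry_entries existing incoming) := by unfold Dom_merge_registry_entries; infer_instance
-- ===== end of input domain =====

-- B replaces A's forward dict-overwrite merge and in-loop counter by staging (key, item) pairs and
-- scanning them back to front with a seen-set (last occurrence wins), counting additions in that
-- scan, then sorting the kept pairs (objective: alternative algorithm, same cost; no merge dict).

-- ===== PORT A =====
-- `str(item.get('factor_name'))` under the truthiness filter, and `str(item.get('factor_name', ''))`,
-- are both `(Dict.mk item).getD "factor_name" ""` (the value is already a string; the falsy values
-- None and '' both compare equal to "" here).  `str(item['factor_name'])` is ported with the same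
-- getD: its default "" is unreachable under Pre_, which excludes the KeyError inputs.
def merge_registry_entries (existing : List (List (String × String))) (incoming : List (List (String × String))) : (List (List (String × String))) × Int :=
  let by_name : PySem.Dict String (List (String × String)) :=
    existing.foldl (fun d item =>
      if (PySem.Dict.mk item).getD "factor_name" "" ≠ "" then
        d.insert ((PySem.Dict.mk item).getD "factor_name" "") item
      else d) PySem.Dict.empty
  let st :=
    incoming.foldl (fun (p : PySem.Dict String (List (String × String)) × Int) item =>
      let factor_name := (PySem.Dict.mk item).getD "factor_name" ""
      (p.1.insert factor_name item,
       if p.1.contains factor_name then p.2 else p.2 + 1)) (by_name, (0 : Int))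
  (PySem.List.sorted st.1.values (fun item => (PySem.Dict.mk item).getD "factor_name" "") false, st.2)

-- ===== PORT B =====
-- Source B stages ex_pairs/inc_pairs, walks each list in reverse with a seen-set, keeping a key's first
-- (reversed) = last occurrence and counting kept incoming keys absent from ex_keys, then sorts.
def merge_registry_entries_alt (existing : List (List (String × String))) (incoming : List (List (String × String))) : (List (List (String × String))) × Int :=
  let ex_pairs : List (String × List (String × String)) :=
    (existing.filter (fun item => decide ((PySem.Dict.mk item).getD "factor_name" "" ≠ ""))).map
      (fun item => ((PySem.Dict.mk item).getD "factor_name" "", item))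
  let inc_pairs : List (String × List (String × String)) :=
    incoming.map (fun item => ((PySem.Dict.mk item).getD "factor_name" "", item))
  let ex_keys : PySem.Set String := PySem.Set.ofList (ex_pairs.map Prod.fst)
  let st1 :=
    inc_pairs.reverse.foldl
      (fun (st : PySem.Set String × List (String × List (String × String)) × Int) kv =>
        if PySem.Set.contains st.1 kv.1 then st
        else (PySem.Set.add st.1 kv.1, st.2.1 ++ [kv],
              if PySem.Set.contains ex_keys kv.1 then st.2.2 else st.2.2 + 1))
      (PySem.Set.empty, [], (0 : Int))
  let st2 :=
    ex_pairs.reverse.foldl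
      (fun (st : PySem.Set String × List (String × List (String × String))) kv =>
        if PySem.Set.contains st.1 kv.1 then st
        else (PySem.Set.add st.1 kv.1, st.2 ++ [kv]))
      (st1.1, st1.2.1)
  ((PySem.List.sorted st2.2 (fun kv => kv.1) false).map Prod.snd, st1.2.2)

-- ===== PRECONDITION & SPEC =====
-- Pre_ excludes exactly the inputs where an incoming item lacks the key 'factor_name':
-- there Python A raises KeyError (and so does B).
def Pre_merge_registry_entries (existing : List (List (String × String))) (incoming : List (List (String × String))) : Prop :=
  incoming.all (fun item => (PySem.Dict.mk item).contains "factor_name") = true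
instance (existing : List (List (String × String))) (incoming : List (List (String × String))) : Decidable (Pre_merge_registry_entries existing incoming) := by unfold Pre_merge_registry_entries; infer_instance
def pvWitness_merge_registry_entries : (List (List (String × String))) × (List (List (String × String))) :=
  ([[("factor_name", "a"), ("v", "1")], [("v", "2")]], [[("factor_name", "b")], [("factor_name", "a"), ("v", "3")]])

def Spec_merge_registry_entries (existing : List (List (String × String))) (incoming : List (List (String × String))) (out : (List (List (String × String))) × Int) : Prop := out = merge_registry_entries_alt existing incoming
instance (existing : List (List (String × String))) (incoming : List (List (String × String))) (out : (List (List (String × String))) × Int) : Decidable (Spec_merge_registry_entries existing incoming out) := by unfold Spec_merge_registry_entries; infer_instance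

-- ===== CLAIM (what is proved, stated in full; the proofs are below) =====
def Claim_equal_merge_registry_entries : Prop := ∀ (existing : List (List (String × String))) (incoming : List (List (String × String))), Dom_merge_registry_entries existing incoming → Pre_merge_registry_entries existing incoming → Spec_merge_registry_entries existing incoming (merge_registry_entries existing incoming)

-- ===== LEMMAS AND PROOFS =====

-- proof-side shorthands (used only below)
def pvKf (item : List (String × String)) : String := (PySem.Dict.mk item).getD "factor_name" ""

def pvIns (d : PySem.Dict String (List (String × String)))
    (P : List (String × List (String × String))) : PySem.Dict String (List (String × String)) :=
  P.foldl (fun d kv => d.insert kv.1 kv.2) d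

def pvDedup (acc : List (String × List (String × String)))
    (Q : List (String × List (String × String))) : List (String × List (String × String)) :=
  Q.foldl (fun acc kv =>
    if PySem.Set.contains (acc.map Prod.fst) kv.1 then acc else acc ++ [kv]) acc

def pvCountNew (exK : PySem.Set String) :
    List (String × List (String × String)) → List (String × List (String × String)) → Int
  | _, [] => 0
  | acc, kv :: Q =>
      if PySem.Set.contains (acc.map Prod.fst) kv.1 then pvCountNew exK acc Q
      else (if PySem.Set.contains exK kv.1 then 0 else 1) + pvCountNew exK (acc ++ [kv]) Q

def pvExP (existing : List (List (String × String))) : List (String × List (String × String)) :=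
  (existing.filter (fun it => decide (pvKf it ≠ ""))).map (fun it => (pvKf it, it))

def pvIncP (incoming : List (List (String × String))) : List (String × List (String × String)) :=
  incoming.map (fun it => (pvKf it, it))

theorem pv_loopB1 (exK : PySem.Set String)
    (Q : List (String × List (String × String))) :
    ∀ (acc : List (String × List (String × String))) (a : Int),
    Q.foldl (fun (st : PySem.Set String × List (String × List (String × String)) × Int) kv =>
        if PySem.Set.contains st.1 kv.1 then st
        else (PySem.Set.add st.1 kv.1, st.2.1 ++ [kv],
              if PySem.Set.contains exK kv.1 then st.2.2 else st.2.2 + 1))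
      (acc.map Prod.fst, acc, a)
      = ((pvDedup acc Q).map Prod.fst, pvDedup acc Q, a + pvCountNew exK acc Q) := by
  induction Q with
  | nil => intro acc a; simp [pvDedup, pvCountNew]
  | cons kv Q ih =>
    intro acc a
    rw [List.foldl_cons]
    cases h : PySem.Set.contains (acc.map Prod.fst) kv.1 with
    | true =>
      rw [if_pos rfl]
      simp only [pvDedup, List.foldl_cons, pvCountNew, h, if_true]
      exact ih acc a
    | false =>
      have hadd : PySem.Set.add (acc.map Prod.fst) kv.1 = (acc ++ [kv]).map Prod.fst := by
        simp only [PySem.Set.add, h, Bool.false_eq_true, if_false, List.map_append]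
        rfl
      rw [if_neg (by simp), hadd]
      simp only [pvDedup, List.foldl_cons, pvCountNew, h, Bool.false_eq_true, if_false]
      rw [ih (acc ++ [kv])]
      simp only [pvDedup]
      simp only [Prod.mk.injEq, true_and]
      split <;> ring

theorem pv_loopB2 (Q : List (String × List (String × String))) :
    ∀ (acc : List (String × List (String × String))),
    Q.foldl (fun (st : PySem.Set String × List (String × List (String × String))) kv =>
        if PySem.Set.contains st.1 kv.1 then st
        else (PySem.Set.add st.1 kv.1, st.2 ++ [kv]))
      (acc.map Prod.fst, acc)
      = ((pvDedup acc Q).map Prod.fst, pvDedup acc Q) := by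
  induction Q with
  | nil => intro acc; simp [pvDedup]
  | cons kv Q ih =>
    intro acc
    rw [List.foldl_cons]
    cases h : PySem.Set.contains (acc.map Prod.fst) kv.1 with
    | true =>
      rw [if_pos rfl]
      simp only [pvDedup, List.foldl_cons, h, if_true]
      exact ih acc
    | false =>
      have hadd : PySem.Set.add (acc.map Prod.fst) kv.1 = (acc ++ [kv]).map Prod.fst := by
        simp only [PySem.Set.add, h, Bool.false_eq_true, if_false, List.map_append]
        rfl
      rw [if_neg (by simp), hadd]
      simp only [pvDedup, List.foldl_cons, h, Bool.false_eq_true, if_false]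
      exact ih (acc ++ [kv])

theorem pv_contains_false_not_mem {s : PySem.Set String} {k : String}
    (h : PySem.Set.contains s k = false) : k ∉ s := by
  intro hm
  rw [(PySem.Set.contains_iff s k).2 hm] at h
  cases h

theorem pv_dedup_nodup (Q : List (String × List (String × String))) :
    ∀ (acc : List (String × List (String × String))),
    (acc.map Prod.fst).Nodup → ((pvDedup acc Q).map Prod.fst).Nodup := by
  induction Q with
  | nil => intro acc h; exact h
  | cons kv Q ih =>
    intro acc h
    simp only [pvDedup, List.foldl_cons]
    cases hc : PySem.Set.contains (acc.map Prod.fst) kv.1 with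
    | true => simp only [if_true]; exact ih acc h
    | false =>
      simp only [Bool.false_eq_true, if_false]
      apply ih
      rw [List.map_append]
      simp only [List.map_cons, List.map_nil]
      refine List.Nodup.append h (List.nodup_singleton _) ?_
      intro x hx hy
      simp only [List.mem_singleton] at hy
      subst hy
      exact (pv_contains_false_not_mem hc) hx

theorem pv_dedup_subset (Q : List (String × List (String × String))) :
    ∀ (acc : List (String × List (String × String)))
    (kv : String × List (String × String)), kv ∈ pvDedup acc Q → kv ∈ acc ∨ kv ∈ Q := by
  induction Q with
  | nil => intro acc kv h; exact Or.inl h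
  | cons x Q ih =>
    intro acc kv h
    simp only [pvDedup, List.foldl_cons] at h
    cases hc : PySem.Set.contains (acc.map Prod.fst) x.1 with
    | true =>
      rw [hc, if_pos rfl] at h
      rcases ih acc kv h with h' | h'
      · exact Or.inl h'
      · exact Or.inr (List.mem_cons_of_mem _ h')
    | false =>
      rw [hc, if_neg (by simp)] at h
      rcases ih (acc ++ [x]) kv h with h' | h'
      · rcases List.mem_append.1 h' with h'' | h''
        · exact Or.inl h''
        · exact Or.inr (List.mem_cons.2 (Or.inl (by simpa using h'')))
      · exact Or.inr (List.mem_cons_of_mem _ h')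

theorem pv_get?_none_iff (l : List (String × List (String × String))) (k : String) :
    (PySem.Dict.mk l).get? k = none ↔ k ∉ l.map Prod.fst := by
  induction l with
  | nil => simp [PySem.Dict.get?]
  | cons p l ih =>
    rw [show (p :: l : List (String × List (String × String))) = (p.1, p.2) :: l by simp]
    rw [PySem.Dict.get?_mk_cons]
    by_cases h : p.1 = k
    · simp [h]
    · simp only [h, beq_iff_eq, if_false, List.map_cons, List.mem_cons]
      rw [ih]
      constructor
      · intro hn; rintro (rfl | hm)
        · exact h rfl
        · exact hn hm
      · intro hn hm; exact hn (Or.inr hm)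

theorem pv_get?_append (l1 l2 : List (String × List (String × String))) (k : String) :
    (PySem.Dict.mk (l1 ++ l2)).get? k =
      ((PySem.Dict.mk l1).get? k).orElse (fun _ => (PySem.Dict.mk l2).get? k) := by
  induction l1 with
  | nil => simp [PySem.Dict.get?]
  | cons p l ih =>
    rw [show ((p :: l) ++ l2 : List (String × List (String × String))) = (p.1, p.2) :: (l ++ l2) by simp]
    rw [show (p :: l : List (String × List (String × String))) = (p.1, p.2) :: l by simp]
    rw [PySem.Dict.get?_mk_cons, PySem.Dict.get?_mk_cons]
    by_cases h : p.1 = k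
    · simp [h]
    · simp only [beq_iff_eq, h, if_false]
      exact ih

theorem pv_dedup_get? (Q : List (String × List (String × String))) :
    ∀ (acc : List (String × List (String × String))) (k : String),
    (PySem.Dict.mk (pvDedup acc Q)).get? k =
      ((PySem.Dict.mk acc).get? k).orElse (fun _ => (PySem.Dict.mk Q).get? k) := by
  induction Q with
  | nil => intro acc k; simp [pvDedup, PySem.Dict.get?]
  | cons kv Q ih =>
    intro acc k
    simp only [pvDedup, List.foldl_cons]
    rw [show (kv :: Q : List (String × List (String × String))) = (kv.1, kv.2) :: Q by simp]
    rw [PySem.Dict.get?_mk_cons]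
    cases hc : PySem.Set.contains (acc.map Prod.fst) kv.1 with
    | true =>
      rw [if_pos rfl]
      have := ih acc k
      simp only [pvDedup] at this
      rw [this]
      by_cases hk : kv.1 = k
      · subst hk
        have hmem : kv.1 ∈ acc.map Prod.fst := (PySem.Set.contains_iff _ _).1 hc
        have : ∃ v, (PySem.Dict.mk acc).get? kv.1 = some v := by
          rcases Option.eq_none_or_eq_some ((PySem.Dict.mk acc).get? kv.1) with h0 | h0
          · exact absurd ((pv_get?_none_iff acc kv.1).1 h0) (by simpa using hmem)
          · exact ⟨_, h0.choose_spec⟩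
        rcases this with ⟨v, hv⟩
        simp [hv]
      · simp only [beq_iff_eq, hk, if_false]
    | false =>
      rw [if_neg (by simp)]
      have := ih (acc ++ [kv]) k
      simp only [pvDedup] at this
      rw [this, pv_get?_append]
      by_cases hk : kv.1 = k
      · subst hk
        have hnone : (PySem.Dict.mk acc).get? kv.1 = none :=
          (pv_get?_none_iff acc kv.1).2 (pv_contains_false_not_mem hc)
        rw [show (PySem.Dict.mk [(kv.1, kv.2)]).get? kv.1 = some kv.2 by
          rw [PySem.Dict.get?_mk_cons]; simp]
        simp [hnone]
      · have h1 : (PySem.Dict.mk [(kv.1, kv.2)]).get? k = none := by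
          rw [PySem.Dict.get?_mk_cons]; simp [hk, PySem.Dict.get?]
        simp only [beq_iff_eq, hk, if_false, h1]
        cases (PySem.Dict.mk acc).get? k <;> simp [Option.orElse]

theorem pv_ins_get? (P : List (String × List (String × String))) (k : String) :
    (pvIns PySem.Dict.empty P).get? k = (PySem.Dict.mk P.reverse).get? k := by
  induction P using List.reverseRecOn with
  | nil => simp [pvIns, PySem.Dict.empty, PySem.Dict.get?]
  | append_singleton P x ih =>
    rw [show pvIns PySem.Dict.empty (P ++ [x]) = (pvIns PySem.Dict.empty P).insert x.1 x.2 by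
      simp [pvIns, List.foldl_append]]
    rw [List.reverse_append, List.reverse_singleton, List.singleton_append]
    rw [show (x :: P.reverse : List (String × List (String × String))) = (x.1, x.2) :: P.reverse by simp]
    rw [PySem.Dict.get?_mk_cons]
    by_cases h : x.1 = k
    · subst h
      simp [PySem.Dict.get?_insert_self]
    · rw [PySem.Dict.get?_insert_of_ne _ _ (fun hh => h hh.symm), ih]
      simp [h]

theorem pv_mem_iff_get? (K : List (String × List (String × String)))
    (h : (K.map Prod.fst).Nodup) (kv : String × List (String × String)) :
    kv ∈ K ↔ (PySem.Dict.mk K).get? kv.1 = some kv.2 := by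
  induction K with
  | nil => simp [PySem.Dict.get?]
  | cons p K ih =>
    simp only [List.map_cons, List.nodup_cons] at h
    rw [show (p :: K : List (String × List (String × String))) = (p.1, p.2) :: K by simp]
    rw [PySem.Dict.get?_mk_cons]
    by_cases hk : p.1 = kv.1
    · rw [if_pos (by simp [hk])]
      constructor
      · intro hm
        rcases List.mem_cons.1 hm with rfl | hm'
        · rfl
        · exact absurd (hk ▸ (List.mem_map.2 ⟨kv, hm', rfl⟩)) h.1
      · intro hs
        have : p = kv := Prod.ext hk (by simpa using hs)
        exact this ▸ List.mem_cons_self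
    · rw [if_neg (by simp [hk])]
      rw [← ih h.2]
      constructor
      · intro hm
        rcases List.mem_cons.1 hm with rfl | hm'
        · exact absurd rfl hk
        · exact hm'
      · exact fun hm => List.mem_cons_of_mem _ hm

theorem pv_countNew_eq (exK : PySem.Set String)
    (Q : List (String × List (String × String))) :
    ∀ (acc : List (String × List (String × String))),
    pvCountNew exK acc Q =
      (((PySem.Set.update (acc.map Prod.fst) (Q.map Prod.fst)).filter
          (fun c => !PySem.Set.contains exK c)).length : Int)
        - (((acc.map Prod.fst).filter (fun c => !PySem.Set.contains exK c)).length : Int) := by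
  induction Q with
  | nil => intro acc; simp [pvCountNew, PySem.Set.update]
  | cons kv Q ih =>
    intro acc
    rw [show (kv :: Q).map Prod.fst = kv.1 :: Q.map Prod.fst by simp]
    rw [PySem.Set.update_cons]
    cases hc : PySem.Set.contains (acc.map Prod.fst) kv.1 with
    | true =>
      have hadd : PySem.Set.add (acc.map Prod.fst) kv.1 = acc.map Prod.fst := by
        simp only [PySem.Set.add, hc, if_true]
      rw [hadd]
      simp only [pvCountNew, hc, if_true]
      exact ih acc
    | false =>
      have hadd : PySem.Set.add (acc.map Prod.fst) kv.1 = (acc ++ [kv]).map Prod.fst := by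
        simp only [PySem.Set.add, hc, Bool.false_eq_true, if_false, List.map_append]
        rfl
      rw [hadd]
      simp only [pvCountNew, hc, Bool.false_eq_true, if_false]
      rw [ih (acc ++ [kv])]
      have hsplit : (((acc ++ [kv]).map Prod.fst).filter (fun c => !PySem.Set.contains exK c)).length
          = ((acc.map Prod.fst).filter (fun c => !PySem.Set.contains exK c)).length
            + (if PySem.Set.contains exK kv.1 then 0 else 1) := by
        rw [List.map_append, List.filter_append, List.length_append]
        have hone : (([kv].map Prod.fst).filter (fun c => !PySem.Set.contains exK c)).length
            = (if PySem.Set.contains exK kv.1 then 0 else 1) := by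
          simp only [List.map_cons, List.map_nil, List.filter_singleton]
          cases h : PySem.Set.contains exK kv.1 <;> simp
        rw [hone]
      rw [hsplit]
      cases h : PySem.Set.contains exK kv.1 <;> simp <;> ring

-- A's paired loop: the dict is the plain insertion fold, and the counter counts the
-- distinct incoming keys absent from the start dict
theorem pv_loopA (kf : List (String × String) → String)
    (L : List (List (String × String)))
    (d : PySem.Dict String (List (String × String))) (a : Int) :
    L.foldl (fun (p : PySem.Dict String (List (String × String)) × Int) it =>
        (p.1.insert (kf it) it, if p.1.contains (kf it) then p.2 else p.2 + 1)) (d, a)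
      = (L.foldl (fun d it => d.insert (kf it) it) d,
         a + (((PySem.Set.ofList (L.map kf)).filter (fun c => !(d.contains c))).length : Int)) := by
  induction L using List.reverseRecOn with
  | nil => simp [PySem.Set.ofList]
  | append_singleton L x ih =>
    rw [List.foldl_append, List.foldl_append, List.foldl_cons, List.foldl_nil,
      List.foldl_cons, List.foldl_nil, ih]
    have hkeys : (L.foldl (fun d it => d.insert (kf it) it) d).keys
        = PySem.Set.update d.keys (L.map kf) :=
      PySem.Dict.keys_foldl_insert_key L kf (fun _ it => it) d
    have hcont : (L.foldl (fun d it => d.insert (kf it) it) d).contains (kf x) = true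
        ↔ (d.contains (kf x) = true ∨ kf x ∈ PySem.Set.ofList (L.map kf)) := by
      rw [PySem.Dict.contains_iff_mem_keys, hkeys, PySem.Set.mem_update,
        PySem.Dict.contains_iff_mem_keys, PySem.Set.mem_ofList]
    have hof : PySem.Set.ofList ((L ++ [x]).map kf)
        = PySem.Set.add (PySem.Set.ofList (L.map kf)) (kf x) := by
      rw [List.map_append, PySem.Set.ofList_append]
      simp [PySem.Set.update_cons, PySem.Set.update_nil]
    rw [hof]
    by_cases hmem : kf x ∈ PySem.Set.ofList (L.map kf)
    · have hadd : PySem.Set.add (PySem.Set.ofList (L.map kf)) (kf x)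
          = PySem.Set.ofList (L.map kf) := by
        simp only [PySem.Set.add]
        rw [(PySem.Set.contains_iff _ _).2 hmem]; simp
      have hc : (L.foldl (fun d it => d.insert (kf it) it) d).contains (kf x) = true :=
        hcont.2 (Or.inr hmem)
      simp [hc, hadd]
    · have hadd : PySem.Set.add (PySem.Set.ofList (L.map kf)) (kf x)
          = PySem.Set.ofList (L.map kf) ++ [kf x] := by
        simp only [PySem.Set.add]
        have : PySem.Set.contains (PySem.Set.ofList (L.map kf)) (kf x) = false := by
          cases h : PySem.Set.contains (PySem.Set.ofList (L.map kf)) (kf x) with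
          | false => rfl
          | true => exact absurd ((PySem.Set.contains_iff _ _).1 h) hmem
        rw [this]; simp
      rw [hadd, List.filter_append]
      by_cases hdc : d.contains (kf x)
      · have hc : (L.foldl (fun d it => d.insert (kf it) it) d).contains (kf x) = true :=
          hcont.2 (Or.inl hdc)
        simp [hc, hdc]
      · have hdcf : d.contains (kf x) = false := by simpa using hdc
        have hc : (L.foldl (fun d it => d.insert (kf it) it) d).contains (kf x) = false := by
          cases h : (L.foldl (fun d it => d.insert (kf it) it) d).contains (kf x) with
          | false => rfl
          | true =>
            rcases hcont.1 h with h' | h'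
            · rw [hdcf] at h'; cases h'
            · exact absurd h' hmem
        simp [hc, hdcf]
        ring


theorem pv_dedup_append (acc Q1 Q2 : List (String × List (String × String))) :
    pvDedup (pvDedup acc Q1) Q2 = pvDedup acc (Q1 ++ Q2) := by
  simp [pvDedup, List.foldl_append]

-- (pvIns d P).keys: insertion order of the distinct keys
theorem pv_ins_keys (P : List (String × List (String × String))) :
    (pvIns PySem.Dict.empty P).keys = PySem.Set.ofList (P.map Prod.fst) := by
  have h := PySem.Dict.keys_foldl_insert_key P Prod.fst
    (fun (_ : PySem.Dict String (List (String × String))) (kv : String × List (String × String)) => kv.2)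
    PySem.Dict.empty
  have he : (PySem.Dict.empty : PySem.Dict String (List (String × String))).keys = [] := rfl
  rw [he, PySem.Set.update_nil_left] at h
  rw [← h, pvIns]

theorem pv_ins_contains (P : List (String × List (String × String))) (c : String) :
    (pvIns PySem.Dict.empty P).contains c
      = PySem.Set.contains (PySem.Set.ofList (P.map Prod.fst)) c := by
  rw [Bool.eq_iff_iff, PySem.Dict.contains_iff_mem_keys, pv_ins_keys, PySem.Set.contains_iff]

-- A's program, in staged-pair form
theorem pv_A_eq (existing incoming : List (List (String × String))) :
    merge_registry_entries existing incoming
      = (PySem.List.sorted (pvIns PySem.Dict.empty (pvExP existing ++ pvIncP incoming)).values pvKf false,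
         (((PySem.Set.ofList (incoming.map pvKf)).filter
            (fun c => !PySem.Set.contains (PySem.Set.ofList ((pvExP existing).map Prod.fst)) c)).length : Int)) := by
  simp only [merge_registry_entries]
  rw [pv_loopA]
  have h1 : existing.foldl (fun d item =>
      if (PySem.Dict.mk item).getD "factor_name" "" ≠ "" then
        d.insert ((PySem.Dict.mk item).getD "factor_name" "") item
      else d) PySem.Dict.empty = pvIns PySem.Dict.empty (pvExP existing) := by
    rw [PySem.List.foldl_ite_eq_foldl_filter
      (p := fun item => (PySem.Dict.mk item).getD "factor_name" "" ≠ "")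
      (f := fun (d : PySem.Dict String (List (String × String))) item =>
        d.insert ((PySem.Dict.mk item).getD "factor_name" "") item)]
    simp [pvIns, pvExP, pvKf, List.foldl_map]
  rw [h1]
  have h2 : incoming.foldl (fun d it =>
        d.insert ((PySem.Dict.mk it).getD "factor_name" "") it)
        (pvIns PySem.Dict.empty (pvExP existing))
      = pvIns PySem.Dict.empty (pvExP existing ++ pvIncP incoming) := by
    simp [pvIns, pvIncP, pvKf, List.foldl_append, List.foldl_map]
  rw [h2]
  have h3 : (fun c => !(pvIns PySem.Dict.empty (pvExP existing)).contains c)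
      = (fun c => !PySem.Set.contains (PySem.Set.ofList ((pvExP existing).map Prod.fst)) c) := by
    funext c; rw [pv_ins_contains]
  rw [h3]
  simp only [zero_add]
  rfl

-- B's program, in staged-pair form
theorem pv_B_eq (existing incoming : List (List (String × String))) :
    merge_registry_entries_alt existing incoming
      = ((PySem.List.sorted (pvDedup [] (pvExP existing ++ pvIncP incoming).reverse)
            (fun kv => kv.1) false).map Prod.snd,
         pvCountNew (PySem.Set.ofList ((pvExP existing).map Prod.fst)) [] (pvIncP incoming).reverse) := by
  simp only [merge_registry_entries_alt]
  rw [show ((PySem.Set.empty : PySem.Set String),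
        ([] : List (String × List (String × String))), (0 : Int))
      = ((([] : List (String × List (String × String))).map Prod.fst),
        ([] : List (String × List (String × String))), (0 : Int)) from rfl]
  rw [pv_loopB1]
  simp only []
  rw [pv_loopB2, pv_dedup_append, ← List.reverse_append]
  simp [pvExP, pvIncP, pvKf]

-- every staged pair carries its own key
theorem pv_pair_key (existing incoming : List (List (String × String)))
    (kv : String × List (String × String))
    (h : kv ∈ pvExP existing ++ pvIncP incoming) : pvKf kv.2 = kv.1 := by
  rcases List.mem_append.1 h with h' | h'
  · rcases List.mem_map.1 h' with ⟨it, _, rfl⟩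
    rfl
  · rcases List.mem_map.1 h' with ⟨it, _, rfl⟩
    rfl

-- ===== VERDICT (by name: the statement is the Claim_ definition above) =====
theorem merge_registry_entries_spec : Claim_equal_merge_registry_entries := by
  intro existing incoming _dom _pre
  show merge_registry_entries existing incoming = merge_registry_entries_alt existing incoming
  rw [pv_A_eq, pv_B_eq]
  have P := pvExP existing ++ pvIncP incoming
  refine Prod.ext ?_ ?_
  · -- merged lists
    set P : List (String × List (String × String)) := pvExP existing ++ pvIncP incoming with hP
    set K : List (String × List (String × String)) := pvDedup [] P.reverse with hK
    have hKnodup : (K.map Prod.fst).Nodup := pv_dedup_nodup _ _ (by simp)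
    have hXkeys : (pvIns PySem.Dict.empty P).keys = PySem.Set.ofList (P.map Prod.fst) :=
      pv_ins_keys P
    have hXnodup : (pvIns PySem.Dict.empty P).keys.Nodup := by
      rw [hXkeys]; exact PySem.Set.nodup_ofList _
    have hXitems_nodup : (pvIns PySem.Dict.empty P).items.Nodup :=
      List.Nodup.of_map Prod.fst (by exact hXnodup)
    have hKpairs_nodup : K.Nodup := List.Nodup.of_map Prod.fst hKnodup
    have hget : ∀ k, (pvIns PySem.Dict.empty P).get? k = (PySem.Dict.mk K).get? k := by
      intro k
      rw [pv_ins_get?, hK, pv_dedup_get?]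
      rfl
    have hperm : (pvIns PySem.Dict.empty P).items.Perm K := by
      rw [List.perm_ext_iff_of_nodup hXitems_nodup hKpairs_nodup]
      intro kv
      rw [pv_mem_iff_get? _ (by exact hXnodup) kv, pv_mem_iff_get? _ hKnodup kv]
      rw [show PySem.Dict.mk (pvIns PySem.Dict.empty P).items = pvIns PySem.Dict.empty P from rfl]
      rw [hget]
    have hSK : (PySem.List.sorted K (fun kv => kv.1) false).Perm K :=
      PySem.List.sorted_perm K (fun kv => kv.1) false
    have hSpair : (PySem.List.sorted K (fun kv => kv.1) false).Pairwise
        (fun a b => a.1 ≤ b.1) := PySem.List.sorted_pairwise K (fun kv => kv.1)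
    have hSnodup : ((PySem.List.sorted K (fun kv => kv.1) false).map Prod.fst).Nodup :=
      ((hSK.map Prod.fst).nodup_iff).2 hKnodup
    have hSne : (PySem.List.sorted K (fun kv => kv.1) false).Pairwise
        (fun a b => a.1 ≠ b.1) := List.pairwise_map.1 hSnodup
    have hSlt : (PySem.List.sorted K (fun kv => kv.1) false).Pairwise
        (fun a b => a.1 < b.1) :=
      (hSpair.and hSne).imp (fun h => lt_of_le_of_ne h.1 h.2)
    have hkeyS : ∀ kv ∈ PySem.List.sorted K (fun kv => kv.1) false, pvKf kv.2 = kv.1 := by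
      intro kv hkv
      have hkK : kv ∈ K := hSK.subset hkv
      rcases pv_dedup_subset _ _ kv hkK with h' | h'
      · cases h'
      · exact pv_pair_key existing incoming kv (List.mem_reverse.1 h')
    have hmaplt : ((PySem.List.sorted K (fun kv => kv.1) false).map Prod.snd).Pairwise
        (fun a b => pvKf a < pvKf b) := by
      rw [List.pairwise_map]
      refine hSlt.imp_of_mem ?_
      intro a b ha hb hlt
      rw [hkeyS a ha, hkeyS b hb]
      exact hlt
    have hpermv : ((PySem.List.sorted K (fun kv => kv.1) false).map Prod.snd).Perm
        (pvIns PySem.Dict.empty P).values :=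
      (hSK.trans hperm.symm).map Prod.snd
    exact PySem.List.sorted_eq_of_perm_of_pairwise_lt _ _ pvKf hpermv hmaplt
  · -- counters
    rw [pv_countNew_eq]
    have hkeys : (pvIncP incoming).reverse.map Prod.fst = (incoming.map pvKf).reverse := by
      simp [pvIncP]
    rw [show (([] : List (String × List (String × String))).map Prod.fst) = ([] : List String) from rfl]
    rw [PySem.Set.update_nil_left, hkeys]
    have hperm : (PySem.Set.ofList ((incoming.map pvKf).reverse)).Perm
        (PySem.Set.ofList (incoming.map pvKf)) := by
      rw [List.perm_ext_iff_of_nodup (PySem.Set.nodup_ofList _) (PySem.Set.nodup_ofList _)]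
      intro a
      rw [PySem.Set.mem_ofList, PySem.Set.mem_ofList, List.mem_reverse]
    rw [(hperm.filter _).length_eq]
    simp
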